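-- pv_equiv track=rewrite | github.com/Vedha-Krishna/SafeWatch | backend/agents/crawler/deterministic.py | rejection_reason
-- ===== SOURCE A (Python) =====
-- REJECTION_RULES: dict[str, list[str]] = {
--     "joke_or_meme": ["lol", "meme", "joking", "just kidding", "haha", "satire"],
--     "general_opinion": [
--         "i think crime is",
--         "singapore is getting",
--         "people nowadays",
--         "in my opinion",
--         "should have more police",
--     ],
--     "vague_warning": [
--         "be careful everyone",
--         "stay safe out there",
--         "heard something happened",
--         "many incidents lately",
--         "avoid this area",
--     ],
--     "non_crime_complaint": [
--         "train delay",
--         "noise complaint",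
--         "dirty toilet",
--         "bad service",
--         "queue was long",
--         "parking expensive",
--     ],
--     "official_or_mainstream": [
--         "reported by police",
--         "spf reported",
--         "straits times reported",
--         "channel newsasia reported",
--         "already in the news",
--     ],
-- }
--
-- def collect_keyword_hits(text: str, rules: dict[str, list[str]]) -> dict[str, list[str]]:
--     lowered = text.lower()
--     hits: dict[str, list[str]] = {}
--
--     for label, keywords in rules.items():
--         matched = [keyword for keyword in keywords if keyword in lowered]
--         if matched:
--             hits[label] = matched
--
--     return hits
--
-- def rejection_reason(text: str) -> str | None:
--     hits = collect_keyword_hits(text, REJECTION_RULES)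
--     if not hits:
--         return None
--
--     reason_priority = [
--         "official_or_mainstream",
--         "joke_or_meme",
--         "non_crime_complaint",
--         "vague_warning",
--         "general_opinion",
--     ]
--     for reason in reason_priority:
--         if reason in hits:
--             return reason
--
--     return next(iter(hits))
-- ===== SOURCE B (Python) =====
-- # B: single short-circuiting priority scan over (reason, keywords) pairs; no hits dict is built.
-- PRIORITY_RULES = [
--     ("official_or_mainstream", [
--         "reported by police",
--         "spf reported",
--         "straits times reported",
--         "channel newsasia reported",
--         "already in the news",
--     ]),
--     ("joke_or_meme", ["lol", "meme", "joking", "just kidding", "haha", "satire"]),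
--     ("non_crime_complaint", [
--         "train delay",
--         "noise complaint",
--         "dirty toilet",
--         "bad service",
--         "queue was long",
--         "parking expensive",
--     ]),
--     ("vague_warning", [
--         "be careful everyone",
--         "stay safe out there",
--         "heard something happened",
--         "many incidents lately",
--         "avoid this area",
--     ]),
--     ("general_opinion", [
--         "i think crime is",
--         "singapore is getting",
--         "people nowadays",
--         "in my opinion",
--         "should have more police",
--     ]),
-- ]
--
-- def rejection_reason(text: str) -> str | None:
--     lowered = text.lower()
--     for reason, keywords in PRIORITY_RULES:
--         if any(keyword in lowered for keyword in keywords):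
--             return reason
--     return None
-- ===== Notes on version B (the rewrite author's own statement) =====
-- stated objective: simpler
-- what changed: Replaced the two-phase gather-all-hits-into-a-dict-then-scan-priority-list design with a single short-circuiting scan of the priority-ordered (reason, keywords) pairs that returns the first reason with any keyword substring match.
import Mathlib
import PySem

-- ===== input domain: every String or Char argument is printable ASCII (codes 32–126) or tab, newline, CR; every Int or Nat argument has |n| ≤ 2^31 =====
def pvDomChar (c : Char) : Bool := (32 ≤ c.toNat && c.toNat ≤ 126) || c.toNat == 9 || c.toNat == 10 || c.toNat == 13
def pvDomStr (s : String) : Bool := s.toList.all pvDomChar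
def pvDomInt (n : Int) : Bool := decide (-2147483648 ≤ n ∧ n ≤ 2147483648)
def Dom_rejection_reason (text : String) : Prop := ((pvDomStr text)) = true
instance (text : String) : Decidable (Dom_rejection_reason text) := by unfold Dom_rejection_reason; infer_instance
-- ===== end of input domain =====

-- B replaces A's gather-all-hits dict + priority scan by one short-circuiting priority scan (simpler decomposition; same asymptotic cost).

-- ===== PORT A =====
def REJECTION_RULES : List (String × List String) := [
  ("joke_or_meme", ["lol", "meme", "joking", "just kidding", "haha", "satire"]),
  ("general_opinion", ["i think crime is", "singapore is getting", "people nowadays",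
    "in my opinion", "should have more police"]),
  ("vague_warning", ["be careful everyone", "stay safe out there", "heard something happened",
    "many incidents lately", "avoid this area"]),
  ("non_crime_complaint", ["train delay", "noise complaint", "dirty toilet", "bad service",
    "queue was long", "parking expensive"]),
  ("official_or_mainstream", ["reported by police", "spf reported", "straits times reported",
    "channel newsasia reported", "already in the news"])]

def collect_keyword_hits (text : String) (rules : List (String × List String)) :
    PySem.Dict String (List String) :=
  let lowered := PySem.Str.lower text
  rules.foldl (fun hits p =>
    let matched := p.2.filter (fun keyword => PySem.Str.isIn keyword lowered)
    if matched.isEmpty then hits else hits.insert p.1 matched) PySem.Dict.empty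

def rejection_reason (text : String) : Option String :=
  let hits := collect_keyword_hits text REJECTION_RULES
  if hits.items.isEmpty then none
  else
    let reason_priority := ["official_or_mainstream", "joke_or_meme", "non_crime_complaint",
      "vague_warning", "general_opinion"]
    match reason_priority.find? (fun reason => hits.contains reason) with
    | some reason => some reason
    | none => hits.keys.head?   -- next(iter(hits)); hits nonempty here, so the value exists

-- ===== PORT B =====
def PRIORITY_RULES : List (String × List String) := [
  ("official_or_mainstream", ["reported by police", "spf reported", "straits times reported",
    "channel newsasia reported", "already in the news"]),
  ("joke_or_meme", ["lol", "meme", "joking", "just kidding", "haha", "satire"]),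
  ("non_crime_complaint", ["train delay", "noise complaint", "dirty toilet", "bad service",
    "queue was long", "parking expensive"]),
  ("vague_warning", ["be careful everyone", "stay safe out there", "heard something happened",
    "many incidents lately", "avoid this area"]),
  ("general_opinion", ["i think crime is", "singapore is getting", "people nowadays",
    "in my opinion", "should have more police"])]

def rejection_reason_alt (text : String) : Option String :=
  let lowered := PySem.Str.lower text
  (PRIORITY_RULES.find? (fun p =>
    p.2.any (fun keyword => PySem.Str.isIn keyword lowered))).map (·.1)

-- ===== PRECONDITION & SPEC =====
def Spec_rejection_reason (text : String) (out : Option String) : Prop := out = rejection_reason_alt text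
instance (text : String) (out : Option String) : Decidable (Spec_rejection_reason text out) := by unfold Spec_rejection_reason; infer_instance

-- ===== CLAIM (what is proved, stated in full; the proofs are below) =====
def Claim_equal_rejection_reason : Prop := ∀ (text : String), Dom_rejection_reason text → Spec_rejection_reason text (rejection_reason text)

-- ===== LEMMAS AND PROOFS =====

lemma filter_isEmpty_eq_not_any {α : Type} (p : α → Bool) (l : List α) :
    (l.filter p).isEmpty = !l.any p := by
  induction l with
  | nil => rfl
  | cons a t ih =>
    by_cases h : p a <;> simp [h, ih]

-- ===== VERDICT (by name: the statement is the Claim_ definition above) =====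
theorem rejection_reason_spec : Claim_equal_rejection_reason := by
  intro text _
  unfold Spec_rejection_reason rejection_reason rejection_reason_alt collect_keyword_hits
    REJECTION_RULES PRIORITY_RULES
  simp only [filter_isEmpty_eq_not_any]
  set s := PySem.Str.lower text with hs
  simp only [List.foldl, List.find?]
  generalize (["lol", "meme", "joking", "just kidding", "haha", "satire"].any
      (fun keyword => PySem.Str.isIn keyword s)) = bJ
  generalize (["i think crime is", "singapore is getting", "people nowadays",
      "in my opinion", "should have more police"].any
      (fun keyword => PySem.Str.isIn keyword s)) = bG
  generalize (["be careful everyone", "stay safe out there", "heard something happened",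
      "many incidents lately", "avoid this area"].any
      (fun keyword => PySem.Str.isIn keyword s)) = bV
  generalize (["train delay", "noise complaint", "dirty toilet", "bad service",
      "queue was long", "parking expensive"].any
      (fun keyword => PySem.Str.isIn keyword s)) = bN
  generalize (["reported by police", "spf reported", "straits times reported",
      "channel newsasia reported", "already in the news"].any
      (fun keyword => PySem.Str.isIn keyword s)) = bO
  cases bJ <;> cases bG <;> cases bV <;> cases bN <;> cases bO <;> rfl
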